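-- pv_equiv track=rewrite | github.com/MrBrantCode/unitest_baseline | mut_generate/mist_train_cf/cf_64346/solution.py | Determine_Sentiment_and_Justification
-- ===== SOURCE A (Python) =====
-- def Determine_Sentiment_and_Justification(expression):
--     """
--     Determine the emotional sentiment of a given language expression and provide a justification for the inference based on the language cues used.
--
--     Args:
--         expression (str): A string representing the language expression.
--
--     Returns:
--         tuple: A tuple containing the sentiment as either 'Negative' or 'Affirmative' and a clear justification for the inference.
--     """
--     # Define a dictionary to map negative words to their corresponding justifications
--     negative_words = {
--         'disaster': 'directly indicates a strong negative sentiment as it is typically used to describe something that has gone very wrong or has not achieved its intended purpose or expectation',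
--         'hate': 'directly indicates a strong negative sentiment as it is typically used to describe a strong feeling of dislike or hostility towards something',
--         # Add more words and justifications as needed
--     }
--
--     # Define a dictionary to map affirmative words to their corresponding justifications
--     affirmative_words = {
--         'love': 'directly indicates a strong affirmative sentiment as it is typically used to describe a strong feeling of affection or fondness towards something',
--         'great': 'directly indicates a strong affirmative sentiment as it is typically used to describe something that is of exceptionally high quality or excellence',
--         # Add more words and justifications as needed
--     }
--
--     # Split the expression into words
--     words = expression.split()
--
--     # Initialize sentiment and justification variables
--     sentiment = None
--     justification = None
--
--     # Check for negative words
--     for word in words: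
--         if word.lower() in negative_words:
--             sentiment = 'Negative'
--             justification = negative_words[word.lower()]
--             break
--
--     # Check for affirmative words
--     if sentiment is None:
--         for word in words:
--             if word.lower() in affirmative_words:
--                 sentiment = 'Affirmative'
--                 justification = affirmative_words[word.lower()]
--                 break
--
--     # If no sentiment is found, return a default justification
--     if sentiment is None:
--         sentiment = 'Neutral'
--         justification = 'No clear sentiment can be inferred from the expression.'
--
--     return sentiment, justification
-- ===== SOURCE B (Python) =====
-- def Determine_Sentiment_and_Justification(expression):
--     negative_words = {
--         'disaster': 'directly indicates a strong negative sentiment as it is typically used to describe something that has gone very wrong or has not achieved its intended purpose or expectation',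
--         'hate': 'directly indicates a strong negative sentiment as it is typically used to describe a strong feeling of dislike or hostility towards something',
--     }
--     affirmative_words = {
--         'love': 'directly indicates a strong affirmative sentiment as it is typically used to describe a strong feeling of affection or fondness towards something',
--         'great': 'directly indicates a strong affirmative sentiment as it is typically used to describe something that is of exceptionally high quality or excellence',
--     }
--     neg_j = None
--     aff_j = None
--     for word in expression.split():
--         w = word.lower()
--         if neg_j is None:
--             neg_j = negative_words.get(w)
--         if aff_j is None:
--             aff_j = affirmative_words.get(w)
--     if neg_j is not None:
--         return 'Negative', neg_j
--     if aff_j is not None: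
--         return 'Affirmative', aff_j
--     return 'Neutral', 'No clear sentiment can be inferred from the expression.'
-- ===== Notes on version B (the rewrite author's own statement) =====
-- stated objective: alternative
-- what changed: Replaces A's two sequential break-loops over the word list with a single fused pass maintaining first-found negative and affirmative justifications, deciding the priority (negative over affirmative) once after the loop.
import Mathlib
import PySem

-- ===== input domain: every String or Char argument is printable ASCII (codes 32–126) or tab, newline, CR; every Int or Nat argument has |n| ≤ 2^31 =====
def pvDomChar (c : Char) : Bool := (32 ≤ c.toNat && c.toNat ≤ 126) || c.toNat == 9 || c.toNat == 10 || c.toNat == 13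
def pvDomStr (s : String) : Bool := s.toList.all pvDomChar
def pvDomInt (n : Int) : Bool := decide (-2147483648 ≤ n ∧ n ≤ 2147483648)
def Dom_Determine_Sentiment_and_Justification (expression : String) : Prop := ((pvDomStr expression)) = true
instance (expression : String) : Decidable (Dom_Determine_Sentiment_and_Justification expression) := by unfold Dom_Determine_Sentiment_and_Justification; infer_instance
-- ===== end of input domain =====

-- B replaces A's two sequential break-loops with one fused pass keeping the first-found
-- negative and affirmative justifications, deciding priority after the loop (objective: alternative).

-- ===== PORT A =====
def pvNegWords : PySem.Dict String String := PySem.Dict.ofList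
  [("disaster", "directly indicates a strong negative sentiment as it is typically used to describe something that has gone very wrong or has not achieved its intended purpose or expectation"),
   ("hate", "directly indicates a strong negative sentiment as it is typically used to describe a strong feeling of dislike or hostility towards something")]

def pvAffWords : PySem.Dict String String := PySem.Dict.ofList
  [("love", "directly indicates a strong affirmative sentiment as it is typically used to describe a strong feeling of affection or fondness towards something"),
   ("great", "directly indicates a strong affirmative sentiment as it is typically used to describe something that is of exceptionally high quality or excellence")]

-- A's 'for word in words: if word.lower() in d: … break' loop, returning the justification found
def pvScanA (d : PySem.Dict String String) : List String → Option String
  | [] => none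
  | w :: ws =>
    match PySem.Dict.get? d (PySem.Str.lower w) with
    | some j => some j
    | none => pvScanA d ws

def Determine_Sentiment_and_Justification (expression : String) : String × String :=
  let words := PySem.Str.split₀ expression
  match pvScanA pvNegWords words with
  | some j => ("Negative", j)
  | none =>
    match pvScanA pvAffWords words with
    | some j => ("Affirmative", j)
    | none => ("Neutral", "No clear sentiment can be inferred from the expression.")

-- ===== PORT B =====
-- single fused pass: each slot is filled at most once (Option.or keeps the first value)
def pvLoopB : List String → Option String → Option String → Option String × Option String
  | [], nj, aj => (nj, aj)
  | w :: ws, nj, aj =>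
    let lw := PySem.Str.lower w
    pvLoopB ws (nj.or (PySem.Dict.get? pvNegWords lw)) (aj.or (PySem.Dict.get? pvAffWords lw))

def Determine_Sentiment_and_Justification_alt (expression : String) : String × String :=
  match pvLoopB (PySem.Str.split₀ expression) none none with
  | (some j, _) => ("Negative", j)
  | (none, some j) => ("Affirmative", j)
  | (none, none) => ("Neutral", "No clear sentiment can be inferred from the expression.")

-- ===== PRECONDITION & SPEC =====
def Spec_Determine_Sentiment_and_Justification (expression : String) (out : String × String) : Prop := out = Determine_Sentiment_and_Justification_alt expression
instance (expression : String) (out : String × String) : Decidable (Spec_Determine_Sentiment_and_Justification expression out) := by unfold Spec_Determine_Sentiment_and_Justification; infer_instance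

-- ===== CLAIM (what is proved, stated in full; the proofs are below) =====
def Claim_equal_Determine_Sentiment_and_Justification : Prop := ∀ (expression : String), Dom_Determine_Sentiment_and_Justification expression → Spec_Determine_Sentiment_and_Justification expression (Determine_Sentiment_and_Justification expression)

-- ===== LEMMAS AND PROOFS =====
theorem pvScanA_cons (d : PySem.Dict String String) (w : String) (ws : List String) :
    pvScanA d (w :: ws) = (PySem.Dict.get? d (PySem.Str.lower w)).or (pvScanA d ws) := by
  cases h : PySem.Dict.get? d (PySem.Str.lower w) <;> simp [pvScanA, h, Option.or]

theorem pvLoopB_eq (ws : List String) (nj aj : Option String) :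
    pvLoopB ws nj aj = (nj.or (pvScanA pvNegWords ws), aj.or (pvScanA pvAffWords ws)) := by
  induction ws generalizing nj aj with
  | nil => simp [pvLoopB, pvScanA]
  | cons w ws ih =>
    simp [pvLoopB, ih, pvScanA_cons, Option.or_assoc]

-- ===== VERDICT (by name: the statement is the Claim_ definition above) =====
theorem Determine_Sentiment_and_Justification_spec : Claim_equal_Determine_Sentiment_and_Justification := by
  intro e _
  unfold Spec_Determine_Sentiment_and_Justification
  unfold Determine_Sentiment_and_Justification Determine_Sentiment_and_Justification_alt
  rw [pvLoopB_eq]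
  cases hn : pvScanA pvNegWords (PySem.Str.split₀ e) <;>
    cases ha : pvScanA pvAffWords (PySem.Str.split₀ e) <;> simp [Option.or, hn, ha]
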